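-- pv_equiv track=rewrite | github.com/Constantijn-Dinklo/AgainAndAgain | board.py | adjacent_to_path
-- ===== SOURCE A (Python) =====
-- def adjacent_to_path(coord, path):
--     for path_coord in path:
--         x = path_coord[0]
--         y = path_coord[1]
--         x_offset = [1, 0, -1, 0]
--         y_offset = [0, 1, 0, -1]
--         for i in range(0, len(x_offset)):
--             new_x = x + x_offset[i]
--             new_y = y + y_offset[i]
--             if (new_x == coord[0]) and (new_y == coord[1]):
--                 return True
--
--     return False
-- ===== SOURCE B (Python) =====
-- def adjacent_to_path(coord, path):
--     cells = {(p[0], p[1]) for p in path}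
--     x, y = coord[0], coord[1]
--     return ((x + 1, y) in cells or (x - 1, y) in cells
--             or (x, y + 1) in cells or (x, y - 1) in cells)
-- ===== Notes on version B (the rewrite author's own statement) =====
-- stated objective: alternative
-- what changed: B inverts the traversal: it indexes all path cells into a set in one staged pass and then answers with four constant-time lookups of coord's shifted positions, whereas A scans path and runs an inner offset loop testing each path cell against coord.
import Mathlib
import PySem

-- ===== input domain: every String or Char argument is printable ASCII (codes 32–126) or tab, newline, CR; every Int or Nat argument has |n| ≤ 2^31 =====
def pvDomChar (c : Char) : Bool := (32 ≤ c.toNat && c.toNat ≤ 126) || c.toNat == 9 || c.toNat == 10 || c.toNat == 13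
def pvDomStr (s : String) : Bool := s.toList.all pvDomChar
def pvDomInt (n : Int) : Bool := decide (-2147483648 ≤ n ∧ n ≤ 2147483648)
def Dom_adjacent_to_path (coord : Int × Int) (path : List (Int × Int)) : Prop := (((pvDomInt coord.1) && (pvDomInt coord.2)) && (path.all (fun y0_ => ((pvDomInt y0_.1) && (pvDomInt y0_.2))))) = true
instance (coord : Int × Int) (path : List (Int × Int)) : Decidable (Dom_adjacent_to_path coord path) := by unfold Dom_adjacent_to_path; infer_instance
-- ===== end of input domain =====

-- B inverts the traversal: it indexes the path cells into a set first and then makes four lookups of coord's shifted positions, instead of A's path scan with an inner offset loop (objective: alternative).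

-- ===== PORT A =====
-- A: for each path cell, enumerate the four offsets and compare against coord.
def adjA (coord : Int × Int) : List (Int × Int) → Bool
  | [] => false
  | path_coord :: rest =>
    let x := path_coord.1
    let y := path_coord.2
    let x_offset : List Int := [1, 0, -1, 0]
    let y_offset : List Int := [0, 1, 0, -1]
    if (PySem.List.pyRange 0 (x_offset.length : Int) 1).any (fun i =>
        let new_x := x + PySem.List.pyGetD x_offset i 0
        let new_y := y + PySem.List.pyGetD y_offset i 0
        new_x == coord.1 && new_y == coord.2)
    then true
    else adjA coord rest

def adjacent_to_path (coord : Int × Int) (path : List (Int × Int)) : Bool :=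
  adjA coord path

-- ===== PORT B =====
-- B: build the set of path cells once, then four membership queries of coord's neighbors.
def adjacent_to_path_alt (coord : Int × Int) (path : List (Int × Int)) : Bool :=
  let cells : PySem.Set (Int × Int) := PySem.Set.ofList (path.map (fun p => (p.1, p.2)))
  let x := coord.1
  let y := coord.2
  PySem.Set.contains cells (x + 1, y) || PySem.Set.contains cells (x - 1, y) ||
  PySem.Set.contains cells (x, y + 1) || PySem.Set.contains cells (x, y - 1)

-- ===== PRECONDITION & SPEC =====
def Spec_adjacent_to_path (coord : Int × Int) (path : List (Int × Int)) (out : Bool) : Prop := out = adjacent_to_path_alt coord path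
instance (coord : Int × Int) (path : List (Int × Int)) (out : Bool) : Decidable (Spec_adjacent_to_path coord path out) := by unfold Spec_adjacent_to_path; infer_instance

-- ===== CLAIM (what is proved, stated in full; the proofs are below) =====
def Claim_equal_adjacent_to_path : Prop := ∀ (coord : Int × Int) (path : List (Int × Int)), Dom_adjacent_to_path coord path → Spec_adjacent_to_path coord path (adjacent_to_path coord path)

-- ===== LEMMAS AND PROOFS =====

-- A's inner offset loop on one cell, as a decidable proposition.
theorem inner_eq (coord pc : Int × Int) :
    (([0, 1, 2, 3] : List Int).any (fun i =>
        pc.1 + PySem.List.pyGetD [1, 0, -1, 0] i 0 == coord.1 &&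
        pc.2 + PySem.List.pyGetD [0, 1, 0, -1] i 0 == coord.2))
    = decide ((pc.1 + 1 = coord.1 ∧ pc.2 = coord.2) ∨ (pc.1 - 1 = coord.1 ∧ pc.2 = coord.2) ∨
        (pc.1 = coord.1 ∧ pc.2 + 1 = coord.2) ∨ (pc.1 = coord.1 ∧ pc.2 - 1 = coord.2)) := by
  rw [Bool.eq_iff_iff]
  simp [PySem.List.pyGetD, PySem.List.pyIdx?, PySem.List.pyGet?]
  omega

-- A's result characterised: true iff some path cell is a 4-neighbor of coord.
theorem adjA_iff (coord : Int × Int) (path : List (Int × Int)) :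
    adjA coord path = true ↔
      ∃ p ∈ path, (p.1 + 1 = coord.1 ∧ p.2 = coord.2) ∨ (p.1 - 1 = coord.1 ∧ p.2 = coord.2) ∨
        (p.1 = coord.1 ∧ p.2 + 1 = coord.2) ∨ (p.1 = coord.1 ∧ p.2 - 1 = coord.2) := by
  induction path with
  | nil => simp [adjA]
  | cons pc rest ih =>
    have hr : PySem.List.pyRange 0 (([1, 0, -1, 0] : List Int).length : Int) 1 = [0, 1, 2, 3] := by
      decide
    simp only [adjA, hr, inner_eq coord pc]
    by_cases h : (pc.1 + 1 = coord.1 ∧ pc.2 = coord.2) ∨ (pc.1 - 1 = coord.1 ∧ pc.2 = coord.2) ∨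
        (pc.1 = coord.1 ∧ pc.2 + 1 = coord.2) ∨ (pc.1 = coord.1 ∧ pc.2 - 1 = coord.2) <;>
      simp [h, ih]

-- B's result characterised: the same proposition, via set membership of the four shifted coords.
theorem alt_iff (coord : Int × Int) (path : List (Int × Int)) :
    adjacent_to_path_alt coord path = true ↔
      ∃ p ∈ path, (p.1 + 1 = coord.1 ∧ p.2 = coord.2) ∨ (p.1 - 1 = coord.1 ∧ p.2 = coord.2) ∨
        (p.1 = coord.1 ∧ p.2 + 1 = coord.2) ∨ (p.1 = coord.1 ∧ p.2 - 1 = coord.2) := by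
  simp only [adjacent_to_path_alt, Bool.or_eq_true, PySem.Set.contains_iff,
    PySem.Set.mem_ofList, List.mem_map]
  constructor
  · rintro (((⟨p, hp, he⟩ | ⟨p, hp, he⟩) | ⟨p, hp, he⟩) | ⟨p, hp, he⟩) <;>
      refine ⟨p, hp, ?_⟩ <;> injection he with h1 h2 <;> omega
  · rintro ⟨p, hp, ⟨h1, h2⟩ | ⟨h1, h2⟩ | ⟨h1, h2⟩ | ⟨h1, h2⟩⟩
    · exact Or.inl (Or.inl (Or.inr ⟨p, hp, by rw [Prod.ext_iff]; constructor <;> omega⟩))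
    · exact Or.inl (Or.inl (Or.inl ⟨p, hp, by rw [Prod.ext_iff]; constructor <;> omega⟩))
    · exact Or.inr ⟨p, hp, by rw [Prod.ext_iff]; constructor <;> omega⟩
    · exact Or.inl (Or.inr ⟨p, hp, by rw [Prod.ext_iff]; constructor <;> omega⟩)

-- ===== VERDICT (by name: the statement is the Claim_ definition above) =====
theorem adjacent_to_path_spec : Claim_equal_adjacent_to_path := by
  intro coord path _
  unfold Spec_adjacent_to_path adjacent_to_path
  rw [Bool.eq_iff_iff, adjA_iff, alt_iff]
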